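-- pv_equiv track=rewrite | github.com/idnbso/cs_study | problem_solving/patterns/frequency_counter.py | same_brute_force
-- ===== SOURCE A (Python) =====
-- def same_brute_force(src_array, sq_array):
--     """
--     O(N**2)
--     :param src_array: the source array
--     :param sq_array: the squared source array
--     :return: are the arrays the same
--     """
--     if len(src_array) != len(sq_array):
--         return False
--
--     sq_array_copy = sq_array.copy()
--
--     for num_a in src_array:
--         if num_a**2 not in sq_array_copy:
--             return False
--         sq_array_copy.remove(num_a**2)
--
--     return True
-- ===== SOURCE B (Python) =====
-- def same_brute_force(src_array, sq_array):
--     """Sort-and-compare re-implementation: sorted squares of src equal sorted sq_array."""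
--     return sorted(x ** 2 for x in src_array) == sorted(sq_array)
-- ===== Notes on version B (the rewrite author's own statement) =====
-- stated objective: simpler
-- what changed: Replaces the per-element membership scan with remove on a mutable copy by a one-line comparison of the sorted list of squares of src_array with the sorted sq_array (sorted-list equality is multiset equality, subsuming the length check).
import Mathlib
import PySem

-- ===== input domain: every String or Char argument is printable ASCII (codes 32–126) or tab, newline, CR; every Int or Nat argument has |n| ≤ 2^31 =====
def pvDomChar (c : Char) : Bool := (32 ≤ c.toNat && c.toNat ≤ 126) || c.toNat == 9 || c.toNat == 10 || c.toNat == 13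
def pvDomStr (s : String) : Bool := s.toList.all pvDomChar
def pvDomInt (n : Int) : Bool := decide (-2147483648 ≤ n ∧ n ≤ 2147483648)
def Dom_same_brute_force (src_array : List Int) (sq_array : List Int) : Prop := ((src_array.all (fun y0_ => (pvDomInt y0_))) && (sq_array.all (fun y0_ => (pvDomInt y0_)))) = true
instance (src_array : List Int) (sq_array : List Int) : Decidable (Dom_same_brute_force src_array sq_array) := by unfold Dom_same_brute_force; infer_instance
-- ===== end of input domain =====

-- B replaces A's quadratic membership-and-remove scan by comparing sorted squares with sorted sq_array (return value only; A does not mutate its arguments).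

-- ===== PORT A =====
-- the for-loop over src_array with the mutable copy; List.erase is Python's
-- list.remove (first occurrence), only reached when the element is present
def sbfLoop : List Int → List Int → Bool
  | [], _ => true
  | a :: rest, copy =>
      if a ^ 2 ∈ copy then sbfLoop rest (copy.erase (a ^ 2)) else false

def same_brute_force (src_array : List Int) (sq_array : List Int) : Bool :=
  if src_array.length ≠ sq_array.length then false
  else sbfLoop src_array sq_array

-- ===== PORT B =====
def same_brute_force_alt (src_array : List Int) (sq_array : List Int) : Bool :=
  decide (PySem.List.sorted (src_array.map (fun x => x ^ 2)) (fun x => x) false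
          = PySem.List.sorted sq_array (fun x => x) false)

-- ===== PRECONDITION & SPEC =====
def Spec_same_brute_force (src_array : List Int) (sq_array : List Int) (out : Bool) : Prop := out = same_brute_force_alt src_array sq_array
instance (src_array : List Int) (sq_array : List Int) (out : Bool) : Decidable (Spec_same_brute_force src_array sq_array out) := by unfold Spec_same_brute_force; infer_instance

-- ===== CLAIM (what is proved, stated in full; the proofs are below) =====
def Claim_equal_same_brute_force : Prop := ∀ (src_array : List Int) (sq_array : List Int), Dom_same_brute_force src_array sq_array → Spec_same_brute_force src_array sq_array (same_brute_force src_array sq_array)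

-- ===== LEMMAS AND PROOFS =====

-- A's loop succeeds exactly when the squares of src form a sub-multiset of copy
theorem sbfLoop_eq_subperm (src copy : List Int) :
    sbfLoop src copy = true ↔ (src.map (fun x => x ^ 2)).Subperm copy := by
  induction src generalizing copy with
  | nil => simp [sbfLoop, List.nil_subperm]
  | cons a rest ih =>
    simp only [sbfLoop, List.map_cons]
    by_cases hmem : a ^ 2 ∈ copy
    · simp only [hmem, if_pos, ih]
      constructor
      · intro h
        exact ((List.subperm_cons (a ^ 2)).mpr h).trans
          (List.perm_cons_erase hmem).symm.subperm
      · intro h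
        have := h.erase (a ^ 2)
        simpa using this
    · simp only [hmem, if_neg, not_false_iff]
      constructor
      · intro h; simp at h
      · intro h
        exact absurd (h.subset (List.mem_cons_self)) hmem

theorem same_brute_force_eq_perm (src sq : List Int) :
    same_brute_force src sq = true ↔ (src.map (fun x => x ^ 2)).Perm sq := by
  unfold same_brute_force
  by_cases hlen : src.length = sq.length
  · simp only [hlen, ne_eq, not_true_eq_false, ite_false, sbfLoop_eq_subperm]
    constructor
    · intro h
      exact h.perm_of_length_le (by simp [hlen])
    · exact fun h => h.subperm
  · simp only [ne_eq, hlen, not_false_eq_true, ite_true]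
    constructor
    · intro h; simp at h
    · intro h
      exact absurd (by simpa using h.length_eq) hlen

-- ===== VERDICT (by name: the statement is the Claim_ definition above) =====
theorem same_brute_force_spec : Claim_equal_same_brute_force := by
  intro src sq _
  unfold Spec_same_brute_force same_brute_force_alt
  rw [Bool.eq_iff_iff, same_brute_force_eq_perm, decide_eq_true_iff,
    PySem.List.sorted_id_eq_sorted_id_iff_perm]
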